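-- pv_equiv track=rewrite | github.com/ampimentel/encScheme | exprHelper.py | strToPythonExpr
-- ===== SOURCE A (Python) =====
-- def sepWithDelimiter(lst, delimiter, sp = " "):
--     sep = lst.split(sep= sp+delimiter+sp)
--     lst2 = [item for i in range(len(sep)-1) for item in [sep[i], delimiter] if item != ""]
--     if sep[-1] != "":
--         lst2 += [sep[-1]]
--     return lst2
--
-- def strToPythonExpr(strIn, lstName="lst"):
--     separatedLst = [it for sepAnd in sepWithDelimiter(strIn, "and") for it in sepWithDelimiter(sepAnd, "or")]
--     addParenteses = [it for sep in separatedLst for it in sepWithDelimiter(sep, "(", sp = "")]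
--     addParenteses2 = [it for sep in addParenteses for it in sepWithDelimiter(sep, ")", sp = "")]
--
--     sepEquals = [it for sepLst in addParenteses2 for it in sepWithDelimiter(sepLst, "=", sp="")]
--     indices = [i for i, x in enumerate(sepEquals) if x == "="] #indices with '='
--     for i in indices:
--         sepEquals[i-1] = ("x[\'" + sepEquals[i-1] + "\']").replace(" ", "")
--         sepEquals[i] = "=="
--         sepEquals[i+1] = "str(" + sepEquals[i+1] + ")"
--     return " ".join(sepEquals)
-- ===== SOURCE B (Python) =====
-- # B: one recursive-descent tokenizer over a delimiter priority list replaces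
-- # A's four staged split/reinterleave/filter passes; the '='-patch step and
-- # join are kept as in A.
--
-- _DELIMS = [(" and ", "and"), (" or ", "or"), ("(", "("), (")", ")"), ("=", "=")]
--
-- def _tokens(s, k=0):
--     if s == "":
--         return []
--     if k == len(_DELIMS):
--         return [s]
--     sep, tok = _DELIMS[k]
--     for i in range(len(s) - len(sep) + 1):
--         if s[i:i + len(sep)] == sep:
--             return _tokens(s[:i], k + 1) + [tok] + _tokens(s[i + len(sep):], k)
--     return _tokens(s, k + 1)
--
-- def strToPythonExpr(strIn, lstName="lst"):
--     toks = _tokens(strIn)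
--     for i in [j for j, t in enumerate(toks) if t == "="]:
--         toks[i - 1] = ("x['" + toks[i - 1] + "']").replace(" ", "")
--         toks[i] = "=="
--         toks[i + 1] = "str(" + toks[i + 1] + ")"
--     return " ".join(toks)
-- ===== Notes on version B (the rewrite author's own statement) =====
-- stated objective: alternative
-- what changed: A's four cascaded split/reinterleave/empty-filter passes (one per delimiter) are replaced by a single recursive-descent tokenizer over a delimiter priority list that splits at the first separator occurrence and recurses on both sides; the '='-patch loop and join are kept as in A.
-- outside the precondition, e.g. on strToPythonExpr('=', 'lst'): A raises IndexError, B raises IndexError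
import Mathlib
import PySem

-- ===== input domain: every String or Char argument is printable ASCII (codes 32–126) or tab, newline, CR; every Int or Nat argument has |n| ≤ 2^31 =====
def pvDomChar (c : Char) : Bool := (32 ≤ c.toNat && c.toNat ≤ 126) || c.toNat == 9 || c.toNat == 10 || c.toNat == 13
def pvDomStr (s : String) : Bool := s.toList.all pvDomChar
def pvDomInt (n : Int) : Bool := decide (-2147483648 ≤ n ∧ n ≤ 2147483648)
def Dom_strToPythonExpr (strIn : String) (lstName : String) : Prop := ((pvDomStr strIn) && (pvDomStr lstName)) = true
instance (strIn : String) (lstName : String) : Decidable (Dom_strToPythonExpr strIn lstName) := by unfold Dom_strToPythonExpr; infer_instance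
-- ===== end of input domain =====

-- B replaces A's four staged split/reinterleave/filter passes by one recursive-descent
-- tokenizer over a delimiter priority list; the '='-patch loop and the join are kept as in A.

-- ===== PORT A =====
-- lst.split(sep=...) is ported as PySem.Chars.splitOn (the separator sp+delimiter+sp is
-- always nonempty here, so Python's split never raises).
-- 'for i in range(len(sep)-1): ... sep[i] ...' visits the pieces except the last, in
-- order: ported as sep.dropLast; 'sep[-1]' is the last piece (sep is never empty): getLastD.
def sepWithDelimiterL (lst : List Char) (delimiter : List Char) (sp : List Char) : List (List Char) :=
  let sep := PySem.Chars.splitOn lst (sp ++ delimiter ++ sp)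
  let lst2 := sep.dropLast.flatMap (fun piece => ([piece, delimiter]).filter (fun item => item != []))
  if sep.getLastD [] != [] then lst2 ++ [sep.getLastD []] else lst2

-- one iteration of A's '=' patch loop (Python list assignment at a possibly negative index
-- = pySetD; the i+1 assignment is out of range exactly where Python raises IndexError,
-- which Pre_ excludes)
def patchTokA (ts : List (List Char)) (i : Int) : List (List Char) :=
  let ts1 := PySem.List.pySetD ts (i-1)
      (PySem.Chars.replace ("x['".toList ++ PySem.List.pyGetD ts (i-1) [] ++ "']".toList) " ".toList [])
  let ts2 := PySem.List.pySetD ts1 i "==".toList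
  PySem.List.pySetD ts2 (i+1) ("str(".toList ++ PySem.List.pyGetD ts2 (i+1) [] ++ ")".toList)

def applyEqualsA (ts : List (List Char)) : List (List Char) :=
  let indices := ((PySem.List.enumerate ts 0).filter (fun p => p.2 == "=".toList)).map (·.1)
  indices.foldl patchTokA ts

def strToPythonExpr (strIn : String) (lstName : String) : String :=
  let separatedLst := (sepWithDelimiterL strIn.toList "and".toList " ".toList).flatMap
      (fun sepAnd => sepWithDelimiterL sepAnd "or".toList " ".toList)
  let addParenteses := separatedLst.flatMap (fun sep => sepWithDelimiterL sep "(".toList [])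
  let addParenteses2 := addParenteses.flatMap (fun sep => sepWithDelimiterL sep ")".toList [])
  let sepEquals := addParenteses2.flatMap (fun sepLst => sepWithDelimiterL sepLst "=".toList [])
  String.ofList (PySem.Chars.join " ".toList (applyEqualsA sepEquals))

-- ===== PORT B =====
-- the scan 'for i in range(len(s)-len(sep)+1): if s[i:i+len(sep)] == sep' of Source B, ported
-- as a structural scan: pre holds the scanned prefix reversed; the slice test is
-- isPrefixOf on the remainder (exact: a remainder shorter than sep can never match).
def firstSplitB (sep : List Char) (pre : List Char) (rest : List Char) : Option (List Char × List Char) :=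
  if sep.isPrefixOf rest then some (pre.reverse, rest.drop sep.length)
  else match rest with
    | [] => none
    | c :: r => firstSplitB sep (c :: pre) r

theorem firstSplitB_lengths (sep : List Char) : ∀ (rest pre p q : List Char),
    sep ≠ [] → firstSplitB sep pre rest = some (p, q) →
    p.length + q.length + 1 ≤ pre.length + rest.length := by
  intro rest
  induction rest with
  | nil =>
    intro pre p q hs h
    rw [firstSplitB] at h
    rcases sep with _ | ⟨c, cs⟩
    · exact absurd rfl hs
    · simp [List.isPrefixOf] at h
  | cons ch r ih =>
    intro pre p q hs h
    rw [firstSplitB] at h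
    by_cases hp : sep.isPrefixOf (ch :: r)
    · rw [if_pos hp] at h
      obtain ⟨rfl, rfl⟩ := Prod.mk.injEq .. ▸ (Option.some.injEq _ _ ▸ h)
      have hl : sep.length ≥ 1 := by
        rcases sep with _ | _
        · exact absurd rfl hs
        · simp
      have hle : sep.length ≤ (ch :: r).length :=
        List.IsPrefix.length_le (List.isPrefixOf_iff_prefix.mp hp)
      simp [List.length_drop, List.length_reverse] at *
      omega
    · rw [if_neg hp] at h
      have := ih (ch :: pre) p q hs h
      simp at this ⊢
      omega


-- each delimiter of Source B's _DELIMS is stored as (head char, tail chars, token string);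
-- the head/tail split only records that the separator string is nonempty
def tokB : List ((Char × List Char) × List Char) → List Char → List (List Char)
  | _, [] => []
  | [], s => [s]
  | ((c, cs), tok) :: ds, s =>
    match h : firstSplitB (c :: cs) [] s with
    | none => tokB ds s
    | some (p, q) => tokB ds p ++ tok :: tokB (((c, cs), tok) :: ds) q
termination_by ds s => (s.length, ds.length)
decreasing_by
  · exact Prod.Lex.right _ (Nat.lt_succ_self _)
  · have := firstSplitB_lengths (c :: cs) s [] p q (by simp) h
    exact Prod.Lex.left _ _ (by simp at this; omega)
  · have := firstSplitB_lengths (c :: cs) s [] p q (by simp) h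
    exact Prod.Lex.left _ _ (by simp at this; omega)


def delimsB : List ((Char × List Char) × List Char) :=
  [((' ', "and ".toList), "and".toList), ((' ', "or ".toList), "or".toList),
   (('(', []), "(".toList), ((')', []), ")".toList), (('=', []), "=".toList)]

-- Source B's '=' patch loop and join are the same code as in A
def patchTokB (ts : List (List Char)) (i : Int) : List (List Char) :=
  let ts1 := PySem.List.pySetD ts (i-1)
      (PySem.Chars.replace ("x['".toList ++ PySem.List.pyGetD ts (i-1) [] ++ "']".toList) " ".toList [])
  let ts2 := PySem.List.pySetD ts1 i "==".toList
  PySem.List.pySetD ts2 (i+1) ("str(".toList ++ PySem.List.pyGetD ts2 (i+1) [] ++ ")".toList)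

def applyEqualsB (ts : List (List Char)) : List (List Char) :=
  let indices := ((PySem.List.enumerate ts 0).filter (fun p => p.2 == "=".toList)).map (·.1)
  indices.foldl patchTokB ts

def strToPythonExpr_alt (strIn : String) (lstName : String) : String :=
  String.ofList (PySem.Chars.join " ".toList (applyEqualsB (tokB delimsB strIn.toList)))

-- ===== PRECONDITION & SPEC =====
-- Pre_ excludes exactly the inputs where the Python A raises IndexError: a strIn ending in
-- '=' makes '=' the last token, so the patch loop accesses sepEquals[i+1] past the end.
def Pre_strToPythonExpr (strIn : String) (lstName : String) : Prop :=
  PySem.Str.endswith strIn "=" = false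
instance (strIn : String) (lstName : String) : Decidable (Pre_strToPythonExpr strIn lstName) := by
  unfold Pre_strToPythonExpr; infer_instance

def pvWitness_strToPythonExpr : String × String := ("a=1 and (b=2 or c=3)", "lst")

def Spec_strToPythonExpr (strIn : String) (lstName : String) (out : String) : Prop := out = strToPythonExpr_alt strIn lstName
instance (strIn : String) (lstName : String) (out : String) : Decidable (Spec_strToPythonExpr strIn lstName out) := by unfold Spec_strToPythonExpr; infer_instance

-- ===== CLAIM (what is proved, stated in full; the proofs are below) =====
def Claim_equal_strToPythonExpr : Prop := ∀ (strIn : String) (lstName : String), Dom_strToPythonExpr strIn lstName → Pre_strToPythonExpr strIn lstName → Spec_strToPythonExpr strIn lstName (strToPythonExpr strIn lstName)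

-- ===== LEMMAS AND PROOFS =====

def scanSpec (c : Char) (cs : List Char) (s : List Char) : List (List Char) :=
  match h : firstSplitB (c :: cs) [] s with
  | none => [s]
  | some (p, q) => p :: scanSpec c cs q
termination_by s.length
decreasing_by
  have := firstSplitB_lengths (c :: cs) s [] p q (by simp) h
  simp at this; omega

theorem scanSpec_none {c : Char} {cs s : List Char} (h : firstSplitB (c :: cs) [] s = none) :
    scanSpec c cs s = [s] := by
  conv_lhs => rw [scanSpec.eq_def]
  split <;> simp_all

theorem scanSpec_some {c : Char} {cs s p q : List Char} (h : firstSplitB (c :: cs) [] s = some (p, q)) :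
    scanSpec c cs s = p :: scanSpec c cs q := by
  conv_lhs => rw [scanSpec.eq_def]
  split <;> simp_all

theorem go_spec (c : Char) (cs : List Char) :
    ∀ (fuel : Nat) (l cur : List Char) (acc : List (List Char)), l.length < fuel →
    PySem.Chars.splitOn.go (c :: cs) fuel l cur acc =
      acc.reverse ++ (match firstSplitB (c :: cs) cur l with
        | none => [cur.reverse ++ l]
        | some (p, q) => p :: scanSpec c cs q) := by
  intro fuel
  induction fuel with
  | zero => intro l cur acc h; omega
  | succ fuel ih =>
    intro l cur acc h
    rcases l with _ | ⟨ch, r⟩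
    · rw [PySem.Chars.splitOn.go, firstSplitB]
      · simp [List.isPrefixOf]
      · omega
    · rw [PySem.Chars.splitOn.go]
      by_cases hp : (c :: cs).isPrefixOf (ch :: r)
      · rw [if_pos hp]
        simp only [List.length_cons, List.drop_succ_cons]
        rw [ih _ _ _ (by simp at h ⊢; omega)]
        have hfix : (match firstSplitB (c :: cs) [] (List.drop cs.length r) with
            | none => [([] : List Char).reverse ++ List.drop cs.length r]
            | some (p, q) => p :: scanSpec c cs q) = scanSpec c cs (List.drop cs.length r) := by
          rcases hfs : firstSplitB (c :: cs) [] (List.drop cs.length r) with _ | ⟨p, q⟩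
          · simp [scanSpec_none hfs]
          · simp [scanSpec_some hfs]
        rw [hfix]
        conv_rhs => rw [firstSplitB, if_pos hp]
        simp
      · rw [if_neg hp]
        rw [ih _ _ _ (by simp at h ⊢; omega)]
        conv_rhs => rw [firstSplitB, if_neg hp]
        rcases hfs : firstSplitB (c :: cs) (ch :: cur) r with _ | ⟨p, q⟩ <;> simp [hfs]

theorem splitOn_eq_scanSpec (c : Char) (cs s : List Char) :
    PySem.Chars.splitOn s (c :: cs) = scanSpec c cs s := by
  rw [PySem.Chars.splitOn]
  rw [go_spec c cs _ _ _ _ (by omega)]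
  rcases hfs : firstSplitB (c :: cs) [] s with _ | ⟨p, q⟩
  · simp [scanSpec_none hfs]
  · simp [scanSpec_some hfs]

theorem scanSpec_ne_nil (c : Char) (cs s : List Char) : scanSpec c cs s ≠ [] := by
  rcases hfs : firstSplitB (c :: cs) [] s with _ | ⟨p, q⟩
  · rw [scanSpec_none hfs]; simp
  · rw [scanSpec_some hfs]; simp

def interA (d : List Char) : List (List Char) → List (List Char)
  | [] => []
  | [p] => if p = [] then [] else [p]
  | p :: ps => (if p = [] then [] else [p]) ++ d :: interA d ps

theorem interA_cons (d p : List Char) (ps : List (List Char)) (h : ps ≠ []) :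
    interA d (p :: ps) = (if p = [] then [] else [p]) ++ d :: interA d ps := by
  rcases ps with _ | ⟨q, rest⟩
  · exact absurd rfl h
  · rfl

theorem build_eq_interA (d : List Char) (hd : d ≠ []) : ∀ ps : List (List Char), ps ≠ [] →
    (if ps.getLastD [] != [] then
        ps.dropLast.flatMap (fun piece => ([piece, d]).filter (fun item => item != [])) ++ [ps.getLastD []]
      else ps.dropLast.flatMap (fun piece => ([piece, d]).filter (fun item => item != []))) = interA d ps := by
  intro ps
  induction ps with
  | nil => intro h; exact absurd rfl h
  | cons p ps ih =>
    intro _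
    rcases ps with _ | ⟨q, rest⟩
    · by_cases hp : p = [] <;> simp [interA, hp]
    · have hne : q :: rest ≠ [] := by simp
      rw [interA_cons d p (q :: rest) hne, ← ih hne]
      have hlast : (p :: q :: rest).getLastD [] = (q :: rest).getLastD [] := by
        simp [List.getLastD_eq_getLast?]
      rw [List.dropLast_cons₂, List.flatMap_cons, hlast]
      by_cases hlz : (q :: rest).getLastD [] != []
      · rw [if_pos hlz, if_pos hlz]
        by_cases hp : p = [] <;> simp [hp, hd]
      · rw [if_neg hlz, if_neg hlz]
        by_cases hp : p = [] <;> simp [hp, hd]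

theorem sepL_eq (lst d sp : List Char) (c : Char) (cs : List Char)
    (hsep : sp ++ d ++ sp = c :: cs) (hd : d ≠ []) :
    sepWithDelimiterL lst d sp = interA d (scanSpec c cs lst) := by
  unfold sepWithDelimiterL
  rw [hsep, splitOn_eq_scanSpec]
  exact build_eq_interA d hd _ (scanSpec_ne_nil c cs lst)

theorem tokB_nil (ds : List ((Char × List Char) × List Char)) : tokB ds [] = [] := by
  rcases ds with _ | ⟨⟨⟨c, cs⟩, tok⟩, ds⟩ <;> rw [tokB.eq_def]

theorem tokB_nil_stack (s : List Char) (hs : s ≠ []) : tokB [] s = [s] := by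
  rcases s with _ | ⟨ch, r⟩
  · exact absurd rfl hs
  · rw [tokB.eq_def]

theorem tokB_cons_none {c : Char} {cs s : List Char} {tok : List Char}
    {ds : List ((Char × List Char) × List Char)}
    (h : firstSplitB (c :: cs) [] s = none) (hs : s ≠ []) :
    tokB (((c, cs), tok) :: ds) s = tokB ds s := by
  rcases s with _ | ⟨ch, r⟩
  · exact absurd rfl hs
  · conv_lhs => rw [tokB.eq_def]
    split <;> (try simp_all) <;> split <;> simp_all

theorem tokB_cons_some {c : Char} {cs s p q : List Char} {tok : List Char}
    {ds : List ((Char × List Char) × List Char)}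
    (h : firstSplitB (c :: cs) [] s = some (p, q)) (hs : s ≠ []) :
    tokB (((c, cs), tok) :: ds) s = tokB ds p ++ tok :: tokB (((c, cs), tok) :: ds) q := by
  rcases s with _ | ⟨ch, r⟩
  · exact absurd rfl hs
  · conv_lhs => rw [tokB.eq_def]
    split <;> (try simp_all) <;> split <;> simp_all

def AsL : List (List Char × List Char) → List Char → List (List Char)
  | [], s => [s]
  | (d, sp) :: ds, s => (sepWithDelimiterL s d sp).flatMap (AsL ds)

inductive TokRel : List (List Char × List Char) → List ((Char × List Char) × List Char) → Prop
  | nil : TokRel [] []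
  | cons (d sp : List Char) (c : Char) (cs : List Char)
      (dsA : List (List Char × List Char)) (dsB : List ((Char × List Char) × List Char)) :
      sp ++ d ++ sp = c :: cs → d ≠ [] → AsL dsA d = [d] → TokRel dsA dsB →
      TokRel ((d, sp) :: dsA) (((c, cs), d) :: dsB)

theorem AsL_nil {dsA : List (List Char × List Char)} (h : dsA ≠ []) : AsL dsA [] = [] := by
  rcases dsA with _ | ⟨⟨d, sp⟩, ds⟩
  · exact absurd rfl h
  · show (sepWithDelimiterL [] d sp).flatMap (AsL ds) = []
    have h1 : PySem.Chars.splitOn [] (sp ++ d ++ sp) = [[]] := by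
      rw [PySem.Chars.splitOn]
      rw [PySem.Chars.splitOn.go]
      · simp
      · simp
    unfold sepWithDelimiterL
    rw [h1]
    simp

theorem main : ∀ (n : Nat) (s : List Char), s.length ≤ n →
    ∀ (dsB : List ((Char × List Char) × List Char)) (dsA : List (List Char × List Char)),
    TokRel dsA dsB → (dsA = [] → s ≠ []) → AsL dsA s = tokB dsB s := by
  intro n
  induction n with
  | zero =>
    intro s hs dsB dsA hrel hne
    have hsnil : s = [] := by rcases s with _ | _ <;> simp_all
    subst hsnil
    rcases hrel with _ | ⟨d, sp, c, cs, dsA', dsB', hsep, hd, hinert, hrel'⟩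
    · exact absurd rfl (hne rfl)
    · rw [tokB_nil, AsL_nil (by simp)]
  | succ n ihn =>
    intro s hs dsB dsA hrel hne
    by_cases hsnil : s = []
    · subst hsnil
      rcases hrel with _ | ⟨d, sp, c, cs, dsA', dsB', hsep, hd, hinert, hrel'⟩
      · exact absurd rfl (hne rfl)
      · rw [tokB_nil, AsL_nil (by simp)]
    · induction hrel with
      | nil => rw [tokB_nil_stack s hsnil]; rfl
      | cons d sp c cs dsA' dsB' hsep hd hinert hrel' ih' =>
        have hA : AsL ((d, sp) :: dsA') s = (interA d (scanSpec c cs s)).flatMap (AsL dsA') := by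
          show (sepWithDelimiterL s d sp).flatMap (AsL dsA') = _
          rw [sepL_eq s d sp c cs hsep hd]
        rcases hfs : firstSplitB (c :: cs) [] s with _ | ⟨p, q⟩
        · -- no occurrence of the separator: descend one level on the same string
          rw [hA, scanSpec_none hfs, tokB_cons_none hfs hsnil]
          have : interA d [s] = [s] := by simp [interA, hsnil]
          rw [this]
          simp only [List.flatMap_cons, List.flatMap_nil, List.append_nil]
          exact ih' (fun _ => hsnil)
        · -- first occurrence found: piece p, remainder q
          have hlen := firstSplitB_lengths (c :: cs) s [] p q (by simp) hfs
          simp at hlen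
          rw [hA, scanSpec_some hfs, tokB_cons_some hfs hsnil]
          rw [interA_cons d p _ (scanSpec_ne_nil c cs q)]
          rw [List.flatMap_append, List.flatMap_cons]
          have hq : (interA d (scanSpec c cs q)).flatMap (AsL dsA') = tokB (((c, cs), d) :: dsB') q := by
            have : (interA d (scanSpec c cs q)).flatMap (AsL dsA') = AsL ((d, sp) :: dsA') q := by
              show _ = (sepWithDelimiterL q d sp).flatMap (AsL dsA')
              rw [sepL_eq q d sp c cs hsep hd]
            rw [this]
            exact ihn q (by omega) _ _ (TokRel.cons d sp c cs dsA' dsB' hsep hd hinert hrel') (by simp)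
          have hp : (if p = [] then ([] : List (List Char)) else [p]).flatMap (AsL dsA') = tokB dsB' p := by
            by_cases hpz : p = []
            · subst hpz; rw [tokB_nil]; simp
            · simp only [if_neg hpz, List.flatMap_cons, List.flatMap_nil, List.append_nil]
              exact ihn p (by omega) _ _ hrel' (fun _ => hpz)
          rw [hq, hp, hinert]
          simp


def DA : List (List Char × List Char) :=
  [("and".toList, " ".toList), ("or".toList, " ".toList),
   ("(".toList, []), (")".toList, []), ("=".toList, [])]

theorem relDA : TokRel DA delimsB := by
  refine TokRel.cons _ _ _ _ _ _ (by decide) (by decide) (by decide) ?_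
  refine TokRel.cons _ _ _ _ _ _ (by decide) (by decide) (by decide) ?_
  refine TokRel.cons _ _ _ _ _ _ (by decide) (by decide) (by decide) ?_
  refine TokRel.cons _ _ _ _ _ _ (by decide) (by decide) (by decide) ?_
  refine TokRel.cons _ _ _ _ _ _ (by decide) (by decide) (by decide) ?_
  exact TokRel.nil

theorem tokens_eq (s : List Char) : AsL DA s = tokB delimsB s :=
  main s.length s le_rfl delimsB DA relDA (by simp [DA])

theorem compose (s : List Char) :
    ((((sepWithDelimiterL s "and".toList " ".toList).flatMap
        (fun x => sepWithDelimiterL x "or".toList " ".toList)).flatMap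
        (fun x => sepWithDelimiterL x "(".toList [])).flatMap
        (fun x => sepWithDelimiterL x ")".toList [])).flatMap
        (fun x => sepWithDelimiterL x "=".toList []) = AsL DA s := by
  simp only [AsL, DA, List.flatMap_assoc, List.flatMap_singleton']

theorem patch_eq : applyEqualsB = applyEqualsA := rfl

theorem strToPythonExpr_tokens (strIn lstName : String) :
    strToPythonExpr strIn lstName =
      String.ofList (PySem.Chars.join " ".toList (applyEqualsA (tokB delimsB strIn.toList))) := by
  simp only [strToPythonExpr]
  rw [compose strIn.toList, tokens_eq strIn.toList]

-- ===== VERDICT (by name: the statement is the Claim_ definition above) =====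
theorem strToPythonExpr_spec : Claim_equal_strToPythonExpr := by
  intro strIn lstName _ _
  unfold Spec_strToPythonExpr
  rw [strToPythonExpr_tokens strIn lstName]
  rw [strToPythonExpr_alt, patch_eq]
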